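-- pv_equiv track=rewrite | github.com/1000ji0/VotingSystem | voting_app.py | calculate_condorcet
-- ===== SOURCE A (Python) =====
-- def calculate_condorcet(votes, candidates):
--     wins = {c: 0 for c in candidates}
--     for i in range(len(candidates)):
--         for j in range(i + 1, len(candidates)):
--             a, b = candidates[i], candidates[j]
--             a_wins, b_wins = 0, 0
--             for vote in votes.values():
--                 rank = vote['rank']
--                 if rank[a] < rank[b]:
--                     a_wins += 1
--                 elif rank[b] < rank[a]:
--                     b_wins += 1
--             if a_wins > b_wins:
--                 wins[a] += 1
--             elif b_wins > a_wins:
--                 wins[b] += 1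
--     max_wins = max(wins.values())
--     winners = [c for c, w in wins.items() if w == max_wins]
--     return wins, winners
-- ===== SOURCE B (Python) =====
-- def calculate_condorcet(votes, candidates):
--     n = len(candidates)
--     # Pass 1: build the full pairwise preference table in one sweep over the ballots.
--     pref = {}
--     for i in range(n):
--         for j in range(n):
--             if i != j:
--                 pref[(i, j)] = 0
--     if n >= 2:  # with fewer than two candidates there are no pairs, so no ballot needs reading
--         for vote in votes.values():
--             rank = vote['rank']
--             for i in range(n):
--                 for j in range(i + 1, n):
--                     ra = rank[candidates[i]]
--                     rb = rank[candidates[j]]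
--                     if ra < rb:
--                         pref[(i, j)] += 1
--                     elif rb < ra:
--                         pref[(j, i)] += 1
--     # Pass 2: read the accumulated table and award pairwise wins.
--     wins = {c: 0 for c in candidates}
--     for i in range(n):
--         for j in range(i + 1, n):
--             if pref[(i, j)] > pref[(j, i)]:
--                 wins[candidates[i]] += 1
--             elif pref[(j, i)] > pref[(i, j)]:
--                 wins[candidates[j]] += 1
--     max_wins = max(wins.values())
--     winners = [c for c, w in wins.items() if w == max_wins]
--     return wins, winners
-- ===== Notes on version B (the rewrite author's own statement) =====
-- stated objective: alternative
-- what changed: B replaces A's pair-outer/votes-inner recount (fresh a_wins/b_wins counters per candidate pair) by an explicit pairwise-preference table pref[(i,j)] filled in one sweep over the ballots (skipped when there are no pairs), followed by a separate pass that reads the table to award wins; max/winners tail and dict insertion order are preserved.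
import Mathlib
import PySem

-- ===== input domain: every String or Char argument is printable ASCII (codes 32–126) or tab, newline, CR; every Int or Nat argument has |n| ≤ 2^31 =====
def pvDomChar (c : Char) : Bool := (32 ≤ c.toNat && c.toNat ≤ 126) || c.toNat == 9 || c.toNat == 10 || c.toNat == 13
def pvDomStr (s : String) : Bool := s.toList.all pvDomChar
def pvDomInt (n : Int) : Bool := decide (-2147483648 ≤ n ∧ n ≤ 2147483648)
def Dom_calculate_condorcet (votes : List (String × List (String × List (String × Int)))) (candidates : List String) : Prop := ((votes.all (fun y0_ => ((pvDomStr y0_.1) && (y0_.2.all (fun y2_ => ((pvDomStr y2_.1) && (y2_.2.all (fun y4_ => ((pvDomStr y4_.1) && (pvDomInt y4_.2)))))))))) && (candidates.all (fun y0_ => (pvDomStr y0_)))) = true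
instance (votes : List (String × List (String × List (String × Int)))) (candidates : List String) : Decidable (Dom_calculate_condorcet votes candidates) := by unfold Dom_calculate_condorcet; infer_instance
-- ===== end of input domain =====

-- B replaces A's pair-outer/votes-inner recount by a pairwise-preference table filled in one
-- sweep over the ballots plus a separate table-reading pass; same cost, alternative decomposition.

-- ===== PORT A =====
-- vote['rank'] as a dict (dicts are marshalled through PySem.Dict.ofList: Python dict semantics)
def ccA_rk (v : List (String × List (String × Int))) : PySem.Dict String Int :=
  PySem.Dict.ofList ((PySem.Dict.ofList v).getD "rank" [])

-- A's inner 'for vote in votes.values()' loop: the two counters (a_wins, b_wins)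
def ccA_pair (vvals : List (List (String × List (String × Int)))) (a b : String) : Int × Int :=
  vvals.foldl (fun s v =>
    let rank := ccA_rk v
    if rank.getD a 0 < rank.getD b 0 then (s.1 + 1, s.2)
    else if rank.getD b 0 < rank.getD a 0 then (s.1, s.2 + 1)
    else s) (0, 0)

-- 'max_wins = max(...); winners = [...]; return wins, winners'
def ccA_finish (wins : PySem.Dict String Int) : (List (String × Int)) × List String :=
  let max_wins := (PySem.List.max? wins.values (fun w => w)).getD 0
  (wins.items, (wins.items.filter (fun p => p.2 == max_wins)).map (fun p => p.1))

def calculate_condorcet (votes : List (String × List (String × List (String × Int)))) (candidates : List String) : (List (String × Int)) × List String :=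
  let wins0 : PySem.Dict String Int := candidates.foldl (fun d c => d.insert c 0) PySem.Dict.empty
  let vvals := (PySem.Dict.ofList votes).values
  let n : Int := (candidates.length : Int)
  let wins := (PySem.List.pyRange 0 n 1).foldl (fun wins i =>
    (PySem.List.pyRange (i + 1) n 1).foldl (fun wins j =>
      let a := PySem.List.pyGetD candidates i ""
      let b := PySem.List.pyGetD candidates j ""
      let ab := ccA_pair vvals a b
      if ab.1 > ab.2 then wins.modify a 0 (· + 1)
      else if ab.2 > ab.1 then wins.modify b 0 (· + 1)
      else wins) wins) wins0
  ccA_finish wins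

-- ===== PORT B =====
def ccB_rk (v : List (String × List (String × Int))) : PySem.Dict String Int :=
  PySem.Dict.ofList ((PySem.Dict.ofList v).getD "rank" [])

-- pass-1 init: pref[(i,j)] = 0 for all ordered pairs i != j
def ccB_pref0 (n : Int) : PySem.Dict (Int × Int) Int :=
  (PySem.List.pyRange 0 n 1).foldl (fun d i =>
    (PySem.List.pyRange 0 n 1).foldl (fun d j =>
      if i ≠ j then d.insert (i, j) 0 else d) d) PySem.Dict.empty

-- innermost body of the ballot loop: one candidate pair (i, j) of one ballot
def ccB_istep (rank : PySem.Dict String Int) (candidates : List String) (i : Int) (pref : PySem.Dict (Int × Int) Int) (j : Int) : PySem.Dict (Int × Int) Int :=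
  let ra := rank.getD (PySem.List.pyGetD candidates i "") 0
  let rb := rank.getD (PySem.List.pyGetD candidates j "") 0
  if ra < rb then pref.modify (i, j) 0 (· + 1)
  else if rb < ra then pref.modify (j, i) 0 (· + 1)
  else pref

-- the body of 'for vote in votes.values()': accumulate one ballot into the table
def ccB_vote (candidates : List String) (n : Int) (pref : PySem.Dict (Int × Int) Int) (v : List (String × List (String × Int))) : PySem.Dict (Int × Int) Int :=
  let rank := ccB_rk v
  (PySem.List.pyRange 0 n 1).foldl (fun pref i =>
    (PySem.List.pyRange (i + 1) n 1).foldl (ccB_istep rank candidates i) pref) pref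

def ccB_finish (wins : PySem.Dict String Int) : (List (String × Int)) × List String :=
  let max_wins := (PySem.List.max? wins.values (fun w => w)).getD 0
  (wins.items, (wins.items.filter (fun p => p.2 == max_wins)).map (fun p => p.1))

def calculate_condorcet_alt (votes : List (String × List (String × List (String × Int)))) (candidates : List String) : (List (String × Int)) × List String :=
  let n : Int := (candidates.length : Int)
  -- 'if n >= 2:' — with fewer than two candidates there are no pairs, so no ballot is read
  let pref := if 2 ≤ n then ((PySem.Dict.ofList votes).values).foldl (ccB_vote candidates n) (ccB_pref0 n) else ccB_pref0 n
  let wins0 : PySem.Dict String Int := candidates.foldl (fun d c => d.insert c 0) PySem.Dict.empty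
  let wins := (PySem.List.pyRange 0 n 1).foldl (fun wins i =>
    (PySem.List.pyRange (i + 1) n 1).foldl (fun wins j =>
      if pref.getD (i, j) 0 > pref.getD (j, i) 0 then wins.modify (PySem.List.pyGetD candidates i "") 0 (· + 1)
      else if pref.getD (j, i) 0 > pref.getD (i, j) 0 then wins.modify (PySem.List.pyGetD candidates j "") 0 (· + 1)
      else wins) wins) wins0
  ccB_finish wins

-- ===== PRECONDITION & SPEC =====
-- Pre_ excludes exactly the inputs on which Python A raises: empty candidates (ValueError from
-- max() over an empty dict), and, when there are at least two candidates, a ballot missing the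
-- 'rank' key or a 'rank' dict missing some candidate (KeyError).  B raises on the same inputs.
def Pre_calculate_condorcet (votes : List (String × List (String × List (String × Int)))) (candidates : List String) : Prop :=
  candidates ≠ [] ∧
  (2 ≤ candidates.length →
    ∀ v ∈ (PySem.Dict.ofList votes).values,
      (PySem.Dict.ofList v).contains "rank" = true ∧
      ∀ c ∈ candidates, (PySem.Dict.ofList ((PySem.Dict.ofList v).getD "rank" [])).contains c = true)
instance (votes : List (String × List (String × List (String × Int)))) (candidates : List String) : Decidable (Pre_calculate_condorcet votes candidates) := by unfold Pre_calculate_condorcet; infer_instance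

def pvWitness_calculate_condorcet : (List (String × List (String × List (String × Int)))) × List String :=
  ([("v1", [("rank", [("A", 1), ("B", 2)])]), ("v2", [("rank", [("A", 2), ("B", 1)])])], ["A", "B"])

def Spec_calculate_condorcet (votes : List (String × List (String × List (String × Int)))) (candidates : List String) (out : (List (String × Int)) × List String) : Prop := out = calculate_condorcet_alt votes candidates
instance (votes : List (String × List (String × List (String × Int)))) (candidates : List String) (out : (List (String × Int)) × List String) : Decidable (Spec_calculate_condorcet votes candidates out) := by unfold Spec_calculate_condorcet; infer_instance

-- ===== CLAIM (what is proved, stated in full; the proofs are below) =====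
def Claim_equal_calculate_condorcet : Prop := ∀ (votes : List (String × List (String × List (String × Int)))) (candidates : List String), Dom_calculate_condorcet votes candidates → Pre_calculate_condorcet votes candidates → Spec_calculate_condorcet votes candidates (calculate_condorcet votes candidates)

-- ===== LEMMAS AND PROOFS =====

-- number of ballots preferring a to b
def ccCnt (vvals : List (List (String × List (String × Int)))) (a b : String) : Nat :=
  vvals.countP (fun v => decide ((ccA_rk v).getD a 0 < (ccA_rk v).getD b 0))

theorem ccA_pair_aux (vvals : List (List (String × List (String × Int)))) (a b : String) :
    ∀ (s t : Int),
      (vvals.foldl (fun s v =>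
        let rank := ccA_rk v
        if rank.getD a 0 < rank.getD b 0 then (s.1 + 1, s.2)
        else if rank.getD b 0 < rank.getD a 0 then (s.1, s.2 + 1)
        else s) (s, t)) = (s + (ccCnt vvals a b : Int), t + (ccCnt vvals b a : Int)) := by
  induction vvals with
  | nil => intro s t; simp [ccCnt]
  | cons v l ih =>
    intro s t
    simp only [List.foldl_cons, ccCnt, List.countP_cons]
    by_cases h1 : (ccA_rk v).getD a 0 < (ccA_rk v).getD b 0
    · have h2 : ¬ (ccA_rk v).getD b 0 < (ccA_rk v).getD a 0 := by omega
      simp only [h1, if_true, ih (s + 1) t, ccCnt, h2, decide_eq_true_eq, if_false, decide_false]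
      simp only [Prod.mk.injEq]; push_cast; omega
    · by_cases h2 : (ccA_rk v).getD b 0 < (ccA_rk v).getD a 0
      · simp only [h1, if_false, h2, if_true, ih s (t + 1), ccCnt, decide_eq_true_eq]
        simp only [Prod.mk.injEq]; push_cast; omega
      · simp only [h1, if_false, h2, ih s t, ccCnt, decide_eq_true_eq]
        simp only [Prod.mk.injEq]; push_cast; omega

theorem ccA_pair_eq (vvals : List (List (String × List (String × Int)))) (a b : String) :
    ccA_pair vvals a b = ((ccCnt vvals a b : Int), (ccCnt vvals b a : Int)) := by
  have := ccA_pair_aux vvals a b 0 0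
  simpa [ccA_pair] using this

theorem ccB_pref0_inner (i : Int) (k : Int × Int) :
    ∀ (L : List Int) (d : PySem.Dict (Int × Int) Int), d.getD k 0 = 0 →
      (L.foldl (fun d j => if i ≠ j then d.insert (i, j) 0 else d) d).getD k 0 = 0 := by
  intro L
  induction L with
  | nil => intro d h; exact h
  | cons j L ih =>
    intro d h
    simp only [List.foldl_cons]
    apply ih
    by_cases hij : i ≠ j
    · rw [if_pos hij, PySem.Dict.getD_insert]
      split <;> [rfl; exact h]
    · rw [if_neg hij]; exact h

theorem ccB_pref0_zero (n : Int) (k : Int × Int) : (ccB_pref0 n).getD k 0 = 0 := by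
  unfold ccB_pref0
  have H : ∀ (L : List Int) (d : PySem.Dict (Int × Int) Int), d.getD k 0 = 0 →
      (L.foldl (fun d i => (PySem.List.pyRange 0 n 1).foldl (fun d j => if i ≠ j then d.insert (i, j) 0 else d) d) d).getD k 0 = 0 := by
    intro L
    induction L with
    | nil => intro d h; exact h
    | cons i L ih =>
      intro d h
      simp only [List.foldl_cons]
      exact ih _ (ccB_pref0_inner i k _ d h)
  exact H _ _ (by simp [PySem.Dict.getD_empty])

theorem ccInner_untouched (rank : PySem.Dict String Int) (cands : List String) (i : Int) (k : Int × Int) :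
    ∀ (L : List Int) (d : PySem.Dict (Int × Int) Int), (∀ j ∈ L, (i, j) ≠ k ∧ (j, i) ≠ k) →
      (L.foldl (ccB_istep rank cands i) d).getD k 0 = d.getD k 0 := by
  intro L
  induction L with
  | nil => intro d _; rfl
  | cons j L ih =>
    intro d h
    simp only [List.foldl_cons]
    rw [ih _ (fun j hj => h j (List.mem_cons_of_mem _ hj))]
    have h1 := (h j (List.mem_cons_self)).1
    have h2 := (h j (List.mem_cons_self)).2
    unfold ccB_istep
    dsimp only
    split
    · rw [PySem.Dict.getD_modify, if_neg (Ne.symm h1)]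
    · split
      · rw [PySem.Dict.getD_modify, if_neg (Ne.symm h2)]
      · rfl

theorem ccOuter_untouched (rank : PySem.Dict String Int) (cands : List String) (n : Int) (k : Int × Int) :
    ∀ (Li : List Int) (d : PySem.Dict (Int × Int) Int),
      (∀ i ∈ Li, ∀ j : Int, i < j → (i, j) ≠ k ∧ (j, i) ≠ k) →
      (Li.foldl (fun pref i => (PySem.List.pyRange (i + 1) n 1).foldl (ccB_istep rank cands i) pref) d).getD k 0 = d.getD k 0 := by
  intro Li
  induction Li with
  | nil => intro d _; rfl
  | cons i Li ih =>
    intro d h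
    simp only [List.foldl_cons]
    rw [ih _ (fun i hi => h i (List.mem_cons_of_mem _ hi))]
    refine ccInner_untouched rank cands i k _ d ?_
    intro j hj
    have : i < j := by
      have := (PySem.List.mem_pyRange_one.mp hj).1
      omega
    exact h i List.mem_cons_self j this

theorem ccInner_at_p_lt (rank : PySem.Dict String Int) (cands : List String) (n p q : Int)
    (hpq : p < q) (hq : q < n) (d : PySem.Dict (Int × Int) Int) :
    ((PySem.List.pyRange (p + 1) n 1).foldl (ccB_istep rank cands p) d).getD (p, q) 0 =
      d.getD (p, q) 0 + (if rank.getD (PySem.List.pyGetD cands p "") 0 < rank.getD (PySem.List.pyGetD cands q "") 0 then 1 else 0) := by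
  rw [PySem.List.pyRange_one_append (p + 1) q n (by omega) (by omega),
      PySem.List.pyRange_one_cons (show q < n from hq), List.foldl_append, List.foldl_cons]
  rw [ccInner_untouched rank cands p (p, q) _ _ ?h3]
  case h3 =>
    intro j hj
    have hjq := (PySem.List.mem_pyRange_one.mp hj).1
    constructor <;> intro he <;> injection he with e1 e2 <;> omega
  have hL1 : (List.foldl (ccB_istep rank cands p) d (PySem.List.pyRange (p + 1) q 1)).getD (p, q) 0 = d.getD (p, q) 0 := by
    refine ccInner_untouched rank cands p (p, q) _ d ?_
    intro j hj
    have hjq := (PySem.List.mem_pyRange_one.mp hj).2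
    constructor <;> intro he <;> injection he with e1 e2 <;> omega
  generalize hg : List.foldl (ccB_istep rank cands p) d (PySem.List.pyRange (p + 1) q 1) = d1 at *
  unfold ccB_istep
  dsimp only
  split
  · rw [PySem.Dict.getD_modify, if_pos rfl, hL1]
  · split
    · rw [PySem.Dict.getD_modify, if_neg (by intro he; injection he with e1 e2; omega), hL1]
      simp_all
    · rw [hL1]; simp

theorem ccInner_at_p_gt (rank : PySem.Dict String Int) (cands : List String) (n p q : Int)
    (hpq : p < q) (hq : q < n) (d : PySem.Dict (Int × Int) Int) :
    ((PySem.List.pyRange (p + 1) n 1).foldl (ccB_istep rank cands p) d).getD (q, p) 0 =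
      d.getD (q, p) 0 + (if rank.getD (PySem.List.pyGetD cands q "") 0 < rank.getD (PySem.List.pyGetD cands p "") 0 then 1 else 0) := by
  rw [PySem.List.pyRange_one_append (p + 1) q n (by omega) (by omega),
      PySem.List.pyRange_one_cons (show q < n from hq), List.foldl_append, List.foldl_cons]
  rw [ccInner_untouched rank cands p (q, p) _ _ ?h3]
  case h3 =>
    intro j hj
    have hjq := (PySem.List.mem_pyRange_one.mp hj).1
    constructor <;> intro he <;> injection he with e1 e2 <;> omega
  have hL1 : (List.foldl (ccB_istep rank cands p) d (PySem.List.pyRange (p + 1) q 1)).getD (q, p) 0 = d.getD (q, p) 0 := by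
    refine ccInner_untouched rank cands p (q, p) _ d ?_
    intro j hj
    have hjq := (PySem.List.mem_pyRange_one.mp hj).2
    constructor <;> intro he <;> injection he with e1 e2 <;> omega
  generalize hg : List.foldl (ccB_istep rank cands p) d (PySem.List.pyRange (p + 1) q 1) = d1 at *
  unfold ccB_istep
  dsimp only
  split
  · rw [PySem.Dict.getD_modify, if_neg (by intro he; injection he with e1 e2; omega), hL1]
    next hlt =>
      have : ¬ rank.getD (PySem.List.pyGetD cands q "") 0 < rank.getD (PySem.List.pyGetD cands p "") 0 := by omega
      simp [this]
  · split
    · rw [PySem.Dict.getD_modify, if_pos rfl, hL1]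
    · rw [hL1]; simp

theorem ccB_rk_eq : ccB_rk = ccA_rk := rfl

theorem ccB_vote_getD_lt (candidates : List String) (n : Int) (d : PySem.Dict (Int × Int) Int)
    (v : List (String × List (String × Int))) (p q : Int) (hp : 0 ≤ p) (hpq : p < q) (hq : q < n) :
    (ccB_vote candidates n d v).getD (p, q) 0 =
      d.getD (p, q) 0 + (if (ccB_rk v).getD (PySem.List.pyGetD candidates p "") 0 < (ccB_rk v).getD (PySem.List.pyGetD candidates q "") 0 then 1 else 0) := by
  unfold ccB_vote
  dsimp only
  rw [PySem.List.pyRange_one_append 0 p n hp (by omega),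
      PySem.List.pyRange_one_cons (show p < n by omega), List.foldl_append, List.foldl_cons]
  rw [ccOuter_untouched (ccB_rk v) candidates n (p, q) _ _ ?h3]
  case h3 =>
    intro i hi j hij
    have hip := (PySem.List.mem_pyRange_one.mp hi).1
    constructor <;> intro he <;> injection he with e1 e2 <;> omega
  rw [ccInner_at_p_lt (ccB_rk v) candidates n p q hpq hq]
  rw [ccOuter_untouched (ccB_rk v) candidates n (p, q) _ _ ?h4]
  case h4 =>
    intro i hi j hij
    have hip := (PySem.List.mem_pyRange_one.mp hi).2
    constructor <;> intro he <;> injection he with e1 e2 <;> omega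

theorem ccB_vote_getD_gt (candidates : List String) (n : Int) (d : PySem.Dict (Int × Int) Int)
    (v : List (String × List (String × Int))) (p q : Int) (hp : 0 ≤ p) (hpq : p < q) (hq : q < n) :
    (ccB_vote candidates n d v).getD (q, p) 0 =
      d.getD (q, p) 0 + (if (ccB_rk v).getD (PySem.List.pyGetD candidates q "") 0 < (ccB_rk v).getD (PySem.List.pyGetD candidates p "") 0 then 1 else 0) := by
  unfold ccB_vote
  dsimp only
  rw [PySem.List.pyRange_one_append 0 p n hp (by omega),
      PySem.List.pyRange_one_cons (show p < n by omega), List.foldl_append, List.foldl_cons]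
  rw [ccOuter_untouched (ccB_rk v) candidates n (q, p) _ _ ?h3]
  case h3 =>
    intro i hi j hij
    have hip := (PySem.List.mem_pyRange_one.mp hi).1
    constructor <;> intro he <;> injection he with e1 e2 <;> omega
  rw [ccInner_at_p_gt (ccB_rk v) candidates n p q hpq hq]
  rw [ccOuter_untouched (ccB_rk v) candidates n (q, p) _ _ ?h4]
  case h4 =>
    intro i hi j hij
    have hip := (PySem.List.mem_pyRange_one.mp hi).2
    constructor <;> intro he <;> injection he with e1 e2 <;> omega

theorem ccB_pref_fold_getD (candidates : List String) (n : Int)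
    (p q : Int) (hp : 0 ≤ p) (hpq : p < q) (hq : q < n) :
    ∀ (vvals : List (List (String × List (String × Int)))) (d : PySem.Dict (Int × Int) Int),
      (vvals.foldl (ccB_vote candidates n) d).getD (p, q) 0 =
        d.getD (p, q) 0 + (ccCnt vvals (PySem.List.pyGetD candidates p "") (PySem.List.pyGetD candidates q "") : Int) := by
  intro vvals
  induction vvals with
  | nil => intro d; simp [ccCnt]
  | cons v l ih =>
    intro d
    simp only [List.foldl_cons, ih, ccCnt, List.countP_cons]
    rw [ccB_vote_getD_lt candidates n d v p q hp hpq hq, ccB_rk_eq]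
    by_cases h : (ccA_rk v).getD (PySem.List.pyGetD candidates p "") 0 < (ccA_rk v).getD (PySem.List.pyGetD candidates q "") 0 <;>
      simp [h]; ring

theorem ccB_pref_fold_getD' (candidates : List String) (n : Int)
    (p q : Int) (hp : 0 ≤ p) (hpq : p < q) (hq : q < n) :
    ∀ (vvals : List (List (String × List (String × Int)))) (d : PySem.Dict (Int × Int) Int),
      (vvals.foldl (ccB_vote candidates n) d).getD (q, p) 0 =
        d.getD (q, p) 0 + (ccCnt vvals (PySem.List.pyGetD candidates q "") (PySem.List.pyGetD candidates p "") : Int) := by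
  intro vvals
  induction vvals with
  | nil => intro d; simp [ccCnt]
  | cons v l ih =>
    intro d
    simp only [List.foldl_cons, ih, ccCnt, List.countP_cons]
    rw [ccB_vote_getD_gt candidates n d v p q hp hpq hq, ccB_rk_eq]
    by_cases h : (ccA_rk v).getD (PySem.List.pyGetD candidates q "") 0 < (ccA_rk v).getD (PySem.List.pyGetD candidates p "") 0 <;>
      simp [h]; ring

theorem ccB_pref_getD (candidates : List String) (n : Int)
    (vvals : List (List (String × List (String × Int)))) (p q : Int) (hp : 0 ≤ p) (hpq : p < q) (hq : q < n) :
    (vvals.foldl (ccB_vote candidates n) (ccB_pref0 n)).getD (p, q) 0 =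
      (ccCnt vvals (PySem.List.pyGetD candidates p "") (PySem.List.pyGetD candidates q "") : Int) := by
  rw [ccB_pref_fold_getD candidates n p q hp hpq hq vvals (ccB_pref0 n), ccB_pref0_zero, zero_add]

theorem ccB_pref_getD' (candidates : List String) (n : Int)
    (vvals : List (List (String × List (String × Int)))) (p q : Int) (hp : 0 ≤ p) (hpq : p < q) (hq : q < n) :
    (vvals.foldl (ccB_vote candidates n) (ccB_pref0 n)).getD (q, p) 0 =
      (ccCnt vvals (PySem.List.pyGetD candidates q "") (PySem.List.pyGetD candidates p "") : Int) := by
  rw [ccB_pref_fold_getD' candidates n p q hp hpq hq vvals (ccB_pref0 n), ccB_pref0_zero, zero_add]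

-- when n ≤ 1 every inner range is empty, so the pair loop leaves its accumulator unchanged
theorem cc_fold_trivial {β : Type} (n : Int) (hn : n ≤ 1)
    (g : Int → β → Int → β) (d : β) :
    (PySem.List.pyRange 0 n 1).foldl (fun w i => (PySem.List.pyRange (i + 1) n 1).foldl (g i) w) d = d := by
  by_cases h0 : n ≤ 0
  · rw [PySem.List.pyRange_one_eq_nil h0]; rfl
  · have h1 : n = 1 := by omega
    subst h1
    rw [PySem.List.pyRange_one_cons (by norm_num : (0 : Int) < 1)]
    simp [PySem.List.pyRange_one_eq_nil]

theorem wins_eq (votes : List (String × List (String × List (String × Int)))) (candidates : List String) :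
    calculate_condorcet votes candidates = calculate_condorcet_alt votes candidates := by
  unfold calculate_condorcet calculate_condorcet_alt
  dsimp only
  have hfin : ccB_finish = ccA_finish := rfl
  rw [hfin]
  by_cases h2 : 2 ≤ (candidates.length : Int)
  · rw [if_pos h2]
    congr 1
    apply PySem.List.foldl_congr_mem
    intro wins i hi
    have hi' := PySem.List.mem_pyRange_one.mp hi
    apply PySem.List.foldl_congr_mem
    intro w j hj
    have hj' := PySem.List.mem_pyRange_one.mp hj
    rw [ccA_pair_eq,
        ccB_pref_getD candidates (candidates.length : Int) _ i j (by omega) (by omega) (by omega),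
        ccB_pref_getD' candidates (candidates.length : Int) _ i j (by omega) (by omega) (by omega)]
  · have hn : (candidates.length : Int) ≤ 1 := by omega
    congr 1
    exact (cc_fold_trivial _ hn _ _).trans (cc_fold_trivial _ hn _ _).symm

-- ===== VERDICT (by name: the statement is the Claim_ definition above) =====
theorem calculate_condorcet_spec : Claim_equal_calculate_condorcet := by
  intro votes candidates _hdom _hpre
  exact wins_eq votes candidates
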